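-- pv_equiv track=rewrite | github.com/rpl-cmu/bevrender | dataloader/dataprocessor.py | get_train_datalist
-- ===== SOURCE A (Python) =====
-- def get_train_datalist(sequence_list, timespin, length):
--     """self.logger.info("processing non-overlapping train datalist...")"""
--
--     train_datalist = []
--     total_train_datalist_frames = 0
--     TIMESTAMP_IDX = 0
--
--     for sequence in sequence_list:
--         frame_idx = 0
--         while frame_idx + 1 < len(sequence):
--             start_ts = sequence[frame_idx][TIMESTAMP_IDX]
--             curr_ts = sequence[frame_idx][TIMESTAMP_IDX]
--             candicate = []
--             while curr_ts - start_ts <= timespin and frame_idx + 1 < len(sequence):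
--                 candicate.append(sequence[frame_idx])
--                 frame_idx += 1
--                 curr_ts = sequence[frame_idx][TIMESTAMP_IDX]
--             if len(candicate) > length:
--                 train_datalist.append(candicate)
--
--     for train_item in train_datalist:
--         total_train_datalist_frames += len(train_item)
--     """self.logger.info(
--         "sample size of train_datalist: {}, total frames in train_datalist: {}\n".format(
--             len(train_datalist), total_train_datalist_frames
--         )
--     )"""
--     return train_datalist
-- ===== SOURCE B (Python) =====
-- def get_train_datalist(sequence_list, timespin, length):
--     train_datalist = []
--     for sequence in sequence_list:
--         cand = []
--         start_ts = 0
--         for frame in sequence[:-1]: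
--             ts = frame[0]
--             if cand and ts - start_ts <= timespin:
--                 cand.append(frame)
--             else:
--                 if cand and len(cand) > length:
--                     train_datalist.append(cand)
--                 cand = [frame]
--                 start_ts = ts
--         if cand and len(cand) > length:
--             train_datalist.append(cand)
--     return train_datalist
-- ===== Notes on version B (the rewrite author's own statement) =====
-- stated objective: simpler
-- what changed: Replaces A's nested while loops over a shared frame index (restarting an inner scan per window) by a single flat pass over sequence[:-1] per sequence that keeps the current window and flushes it at each window boundary, and drops the dead total-frames loop.
import Mathlib
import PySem

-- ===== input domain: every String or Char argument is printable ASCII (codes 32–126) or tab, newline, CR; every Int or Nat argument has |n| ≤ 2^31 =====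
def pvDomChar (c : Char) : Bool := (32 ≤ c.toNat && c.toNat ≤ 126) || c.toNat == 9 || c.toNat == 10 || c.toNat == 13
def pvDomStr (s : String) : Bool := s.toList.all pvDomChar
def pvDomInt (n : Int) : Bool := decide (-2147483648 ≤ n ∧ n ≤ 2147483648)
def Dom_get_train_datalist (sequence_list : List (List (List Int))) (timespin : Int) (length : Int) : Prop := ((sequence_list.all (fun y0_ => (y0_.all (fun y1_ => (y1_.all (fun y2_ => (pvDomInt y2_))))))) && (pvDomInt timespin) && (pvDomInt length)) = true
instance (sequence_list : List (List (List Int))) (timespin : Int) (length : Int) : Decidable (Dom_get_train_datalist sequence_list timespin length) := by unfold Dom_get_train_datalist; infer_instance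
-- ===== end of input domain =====

-- B replaces A's nested while loops over a shared frame index by one flat pass per sequence
-- that keeps the current window and flushes it at each boundary (objective: simpler).

-- ===== PORT A =====
-- inner while loop: collects frames into `candicate` while the window fits; frame accesses
-- sequence[frame_idx][0] are in range whenever the Python returns (Pre_ excludes the raising inputs),
-- so they are ported with getD defaults.
def innerA (seq : List (List Int)) (timespin start_ts : Int) (frame_idx : Nat) (curr_ts : Int)
    (cand : List (List Int)) : List (List Int) × Nat :=
  if h : curr_ts - start_ts ≤ timespin ∧ frame_idx + 1 < seq.length then
    innerA seq timespin start_ts (frame_idx + 1) ((seq.getD (frame_idx + 1) []).getD 0 0)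
      (cand ++ [seq.getD frame_idx []])
  else (cand, frame_idx)
termination_by seq.length - frame_idx
decreasing_by omega

-- outer while loop; `fuel` bounds its iterations (each iteration advances frame_idx when the
-- Python terminates, so fuel = seq.length suffices on Pre_; outside Pre_ the Python diverges).
def outerA (seq : List (List Int)) (timespin length : Int) :
    Nat → Nat → List (List (List Int)) → List (List (List Int))
  | 0, _, acc => acc
  | fuel + 1, frame_idx, acc =>
    if frame_idx + 1 < seq.length then
      let start_ts := (seq.getD frame_idx []).getD 0 0
      let p := innerA seq timespin start_ts frame_idx start_ts []
      outerA seq timespin length fuel p.2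
        (if length < (p.1.length : Int) then acc ++ [p.1] else acc)
    else acc

-- (A's trailing loop summing total_train_datalist_frames is dead code for the return value.)
def get_train_datalist (sequence_list : List (List (List Int))) (timespin : Int) (length : Int) :
    List (List (List Int)) :=
  sequence_list.foldl (fun acc seq => outerA seq timespin length seq.length 0 acc) []

-- ===== PORT B =====
def stepB (timespin length : Int) (st : List (List (List Int)) × List (List Int) × Int)
    (frame : List Int) : List (List (List Int)) × List (List Int) × Int :=
  let ts := frame.getD 0 0
  if st.2.1 ≠ [] ∧ ts - st.2.2 ≤ timespin then (st.1, st.2.1 ++ [frame], st.2.2)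
  else ((if st.2.1 ≠ [] ∧ length < (st.2.1.length : Int) then st.1 ++ [st.2.1] else st.1),
        [frame], ts)

-- sequence[:-1] is ported as dropLast (exact for every list).
def seqB (timespin length : Int) (acc : List (List (List Int))) (seq : List (List Int)) :
    List (List (List Int)) :=
  let q := seq.dropLast.foldl (stepB timespin length) (acc, [], 0)
  if q.2.1 ≠ [] ∧ length < (q.2.1.length : Int) then q.1 ++ [q.2.1] else q.1

def get_train_datalist_alt (sequence_list : List (List (List Int))) (timespin : Int) (length : Int) :
    List (List (List Int)) :=
  sequence_list.foldl (seqB timespin length) []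

-- ===== PRECONDITION & SPEC =====
-- Pre_ excludes exactly the inputs where the Python A does not return: with timespin < 0 the outer
-- loop never advances frame_idx (infinite loop) unless every sequence has at most one frame, and an
-- empty frame in a sequence of ≥ 2 frames is reached by sequence[frame_idx][0] (IndexError).
def Pre_get_train_datalist (sequence_list : List (List (List Int))) (timespin : Int) (length : Int) : Prop :=
  (0 ≤ timespin ∨ ∀ s ∈ sequence_list, s.length ≤ 1) ∧
    ∀ s ∈ sequence_list, 2 ≤ s.length → ∀ f ∈ s, f ≠ []
instance (sequence_list : List (List (List Int))) (timespin : Int) (length : Int) : Decidable (Pre_get_train_datalist sequence_list timespin length) := by unfold Pre_get_train_datalist; infer_instance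

def pvWitness_get_train_datalist : List (List (List Int)) × Int × Int :=
  ([[[0], [1], [5]], [[7]]], 2, 0)

def Spec_get_train_datalist (sequence_list : List (List (List Int))) (timespin : Int) (length : Int) (out : List (List (List Int))) : Prop := out = get_train_datalist_alt sequence_list timespin length
instance (sequence_list : List (List (List Int))) (timespin : Int) (length : Int) (out : List (List (List Int))) : Decidable (Spec_get_train_datalist sequence_list timespin length out) := by unfold Spec_get_train_datalist; infer_instance

-- ===== CLAIM (what is proved, stated in full; the proofs are below) =====
def Claim_equal_get_train_datalist : Prop := ∀ (sequence_list : List (List (List Int))) (timespin : Int) (length : Int), Dom_get_train_datalist sequence_list timespin length → Pre_get_train_datalist sequence_list timespin length → Spec_get_train_datalist sequence_list timespin length (get_train_datalist sequence_list timespin length)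

-- ===== LEMMAS AND PROOFS =====

def tsAt (seq : List (List Int)) (j : Nat) : Int := (seq.getD j []).getD 0 0

lemma framesFrom_cons (seq : List (List Int)) (j : Nat) (h : j + 1 < seq.length) :
    seq.dropLast.drop j = seq.getD j [] :: seq.dropLast.drop (j + 1) := by
  have hj : j < seq.dropLast.length := by simp [List.length_dropLast]; omega
  rw [List.drop_eq_getElem_cons hj]
  congr 1
  rw [List.getElem_dropLast]
  exact (List.getD_eq_getElem seq [] (by omega)).symm

lemma framesFrom_nil (seq : List (List Int)) (j : Nat) (h : seq.length ≤ j + 1) :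
    seq.dropLast.drop j = [] := by
  apply List.drop_eq_nil_of_le
  simp [List.length_dropLast]; omega

lemma mid (m : Nat) : ∀ (seq : List (List Int)) (t l s : Int) (j fuel : Nat)
    (cand : List (List Int)) (acc : List (List (List Int))),
    0 ≤ t → cand ≠ [] → j < seq.length → seq.length ≤ j + fuel → seq.length - j ≤ m →
    (outerA seq t l fuel (innerA seq t s j (tsAt seq j) cand).2
      (if l < ((innerA seq t s j (tsAt seq j) cand).1.length : Int)
        then acc ++ [(innerA seq t s j (tsAt seq j) cand).1] else acc))
    = (let q := (seq.dropLast.drop j).foldl (stepB t l) (acc, cand, s)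
       if q.2.1 ≠ [] ∧ l < (q.2.1.length : Int) then q.1 ++ [q.2.1] else q.1) := by
  induction m with
  | zero => intro seq t l s j fuel cand acc ht hc hj hfuel hm; omega
  | succ m ih =>
    intro seq t l s j fuel cand acc ht hc hj hfuel hm
    by_cases hcond : tsAt seq j - s ≤ t ∧ j + 1 < seq.length
    · rw [innerA, dif_pos hcond, framesFrom_cons seq j hcond.2]
      rw [List.foldl_cons]
      have hstep : stepB t l (acc, cand, s) (seq.getD j []) = (acc, cand ++ [seq.getD j []], s) := by
        simp only [stepB]
        rw [if_pos]
        exact ⟨hc, hcond.1⟩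
      rw [hstep]
      exact ih seq t l s (j + 1) fuel (cand ++ [seq.getD j []]) acc ht (by simp) hcond.2
        (by omega) (by omega)
    · rw [innerA, dif_neg hcond]
      simp only
      by_cases hj2 : j + 1 < seq.length
      · -- window closed because tsAt j - s > t; outer restarts at j
        have hts : ¬ (tsAt seq j - s ≤ t) := fun h => hcond ⟨h, hj2⟩
        obtain ⟨f', rfl⟩ : ∃ f', fuel = f' + 1 := by
          cases fuel with
          | zero => omega
          | succ k => exact ⟨k, rfl⟩
        rw [outerA, if_pos hj2]
        simp only
        rw [innerA, dif_pos (show (seq.getD j []).getD 0 0 - (seq.getD j []).getD 0 0 ≤ t ∧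
          j + 1 < seq.length from ⟨by simpa using ht, hj2⟩)]
        rw [framesFrom_cons seq j hj2, List.foldl_cons]
        have hstep : stepB t l (acc, cand, s) (seq.getD j [])
            = ((if l < (cand.length : Int) then acc ++ [cand] else acc), [seq.getD j []], tsAt seq j) := by
          simp only [stepB]
          rw [if_neg (fun h => hts h.2)]
          simp [hc, tsAt]
        rw [hstep]
        have := ih seq t l (tsAt seq j) (j + 1) f' ([] ++ [seq.getD j []])
          (if l < (cand.length : Int) then acc ++ [cand] else acc) ht (by simp) hj2
          (by omega) (by omega)
        simpa [tsAt] using this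
      · -- j is the last index: inner exits, outer loop condition fails
        obtain ⟨f', rfl⟩ : ∃ f', fuel = f' + 1 := by
          cases fuel with
          | zero => omega
          | succ k => exact ⟨k, rfl⟩
        rw [outerA, if_neg hj2]
        rw [framesFrom_nil seq j (by omega)]
        simp [hc]

lemma perseq (seq : List (List Int)) (t l : Int) (acc : List (List (List Int)))
    (h : 0 ≤ t ∨ seq.length ≤ 1) :
    outerA seq t l seq.length 0 acc = seqB t l acc seq := by
  by_cases hn : seq.length ≤ 1
  · -- 0 or 1 frame: both sides return acc unchanged
    unfold seqB
    rw [show seq.dropLast = [] by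
      cases seq with
      | nil => rfl
      | cons a tl =>
        cases tl with
        | nil => rfl
        | cons b tl2 => simp at hn]
    simp only [List.foldl_nil]
    rw [if_neg (by simp)]
    have h01 : seq.length = 0 ∨ seq.length = 1 := by omega
    rcases h01 with h0 | h1
    · rw [h0]; rfl
    · rw [h1, outerA, if_neg (by omega)]
  · have ht : 0 ≤ t := h.resolve_right hn
    have h2 : 2 ≤ seq.length := by omega
    obtain ⟨f', hf⟩ : ∃ f', seq.length = f' + 1 := ⟨seq.length - 1, by omega⟩
    rw [hf, outerA, if_pos (by omega)]
    simp only
    rw [innerA, dif_pos (show (seq.getD 0 []).getD 0 0 - (seq.getD 0 []).getD 0 0 ≤ t ∧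
      0 + 1 < seq.length from ⟨by simpa using ht, by omega⟩)]
    have hcons := framesFrom_cons seq 0 (by omega)
    simp only [List.drop_zero] at hcons
    have hstep : stepB t l (acc, [], 0) (seq.getD 0 []) = (acc, [seq.getD 0 []], tsAt seq 0) := by
      simp [stepB, tsAt]
    unfold seqB
    rw [hcons, List.foldl_cons, hstep]
    have := mid (seq.length) seq t l (tsAt seq 0) 1 f' ([] ++ [seq.getD 0 []]) acc ht (by simp)
      (by omega) (by omega) (by omega)
    simpa [tsAt] using this

lemma fold_eq (L : List (List (List Int))) (t l : Int) :
    ∀ acc, (0 ≤ t ∨ ∀ s ∈ L, s.length ≤ 1) →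
      L.foldl (fun acc seq => outerA seq t l seq.length 0 acc) acc = L.foldl (seqB t l) acc := by
  induction L with
  | nil => intro acc _; rfl
  | cons a tl ih =>
    intro acc hpre
    rw [List.foldl_cons, List.foldl_cons, perseq a t l acc
      (hpre.imp id (fun h => h a (by simp)))]
    exact ih _ (hpre.imp id (fun h s hs => h s (by simp [hs])))

-- ===== VERDICT (by name: the statement is the Claim_ definition above) =====
theorem get_train_datalist_spec : Claim_equal_get_train_datalist := by
  intro L t l _ hpre
  unfold Spec_get_train_datalist get_train_datalist get_train_datalist_alt
  exact fold_eq L t l [] hpre.1
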